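-- pv_equiv track=rewrite | github.com/electronsandbits/python-learning | CS106A/section7/section7/tweets.py | flat_counts
-- ===== SOURCE A (Python) =====
-- def flat_counts(user_tags):
--     """
--     (Extension Problem)
--     Given a user_tags dicts, sum up the tag counts across all users,
--     return a "flat" counts dict with a key for each tag,
--     and its value is the sum of that tag's count across users.
--     >>> flat_counts({'@alice': {'#apple': 1, '#banana': 2}, '@bob': {'#apple': 1}})
--     {'#apple': 2, '#banana': 2}
--     """
--     counts = {}
--     for user in user_tags.keys():
--         tags = user_tags[user]
--         for tag in tags:
--             if tag not in counts:
--                 counts[tag] = 0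
--             counts[tag] += tags[tag]
--     return counts
-- ===== SOURCE B (Python) =====
-- def flat_counts(user_tags):
--     tag_lists = list(user_tags.values())
--     order = []
--     seen = set()
--     for tags in tag_lists:
--         for tag in tags:
--             if tag not in seen:
--                 seen.add(tag)
--                 order.append(tag)
--     return {tag: sum(tags.get(tag, 0) for tags in tag_lists) for tag in order}
-- ===== Notes on version B (the rewrite author's own statement) =====
-- stated objective: alternative
-- what changed: B transposes the loops: instead of A's user-major single pass accumulating into a counts dict with an 'if new: init 0' guard, B first collects the tags in first-occurrence order (ordered-dedup pass) and then, tag-major, computes each tag's total by summing tags.get(tag, 0) across all users; no accumulator dict exists.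
import Mathlib
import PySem

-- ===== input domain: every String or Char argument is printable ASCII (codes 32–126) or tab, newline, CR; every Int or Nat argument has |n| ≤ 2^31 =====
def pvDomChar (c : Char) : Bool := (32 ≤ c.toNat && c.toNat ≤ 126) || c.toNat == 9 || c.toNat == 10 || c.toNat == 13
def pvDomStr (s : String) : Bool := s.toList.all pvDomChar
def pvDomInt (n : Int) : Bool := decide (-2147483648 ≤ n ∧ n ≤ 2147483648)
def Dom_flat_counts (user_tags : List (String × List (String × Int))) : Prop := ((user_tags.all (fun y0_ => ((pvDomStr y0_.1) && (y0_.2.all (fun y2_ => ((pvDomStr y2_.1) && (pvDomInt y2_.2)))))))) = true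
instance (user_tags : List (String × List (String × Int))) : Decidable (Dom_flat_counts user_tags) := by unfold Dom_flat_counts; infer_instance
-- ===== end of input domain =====

-- B transposes A's loops: a first pass deduplicates the tags in first-occurrence order, then a
-- tag-major pass sums each tag's count across all users (no accumulator dict); objective: alternative.

-- ===== PORT A =====
def flat_counts (user_tags : List (String × List (String × Int))) : List (String × Int) :=
  let ut := PySem.Dict.mk user_tags
  let counts : PySem.Dict String Int :=
    (PySem.Dict.keys ut).foldl (fun counts user =>
      let tags := PySem.Dict.mk (ut.getD user [])
      (PySem.Dict.keys tags).foldl (fun counts tag =>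
        let counts := if counts.contains tag then counts else counts.insert tag 0
        counts.insert tag (counts.getD tag 0 + tags.getD tag 0)) counts)
      PySem.Dict.empty
  counts.items

-- ===== PORT B =====
def flat_counts_alt (user_tags : List (String × List (String × Int))) : List (String × Int) :=
  let tag_lists := PySem.Dict.values (PySem.Dict.mk user_tags)
  let st := tag_lists.foldl (fun st tags =>
      (PySem.Dict.keys (PySem.Dict.mk tags)).foldl
        (fun (st : List String × PySem.Set String) tag =>
          if st.2.contains tag then st else (st.1 ++ [tag], st.2.add tag)) st)
    ([], PySem.Set.empty)
  -- the dict comprehension: its keys (st.1) are already distinct, so its items are this map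
  st.1.map (fun tag =>
    (tag, (tag_lists.map (fun tags => (PySem.Dict.mk tags).getD tag 0)).sum))

-- ===== PRECONDITION & SPEC =====
-- Pre_ requires the outer association list and every inner one to have pairwise-distinct keys:
-- the Python arguments are dicts of dicts, so lists with duplicate keys represent no Python input.
def Pre_flat_counts (user_tags : List (String × List (String × Int))) : Prop :=
  (user_tags.map (·.1)).Nodup ∧ ∀ p ∈ user_tags, (p.2.map (·.1)).Nodup
instance (user_tags : List (String × List (String × Int))) : Decidable (Pre_flat_counts user_tags) := by unfold Pre_flat_counts; infer_instance

def pvWitness_flat_counts : (List (String × List (String × Int))) :=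
  [("@alice", [("#apple", 1), ("#banana", 2)]), ("@bob", [("#apple", 1)])]

def Spec_flat_counts (user_tags : List (String × List (String × Int))) (out : List (String × Int)) : Prop := out = flat_counts_alt user_tags
instance (user_tags : List (String × List (String × Int))) (out : List (String × Int)) : Decidable (Spec_flat_counts user_tags out) := by unfold Spec_flat_counts; infer_instance

-- ===== CLAIM (what is proved, stated in full; the proofs are below) =====
def Claim_equal_flat_counts : Prop := ∀ (user_tags : List (String × List (String × Int))), Dom_flat_counts user_tags → Pre_flat_counts user_tags → Spec_flat_counts user_tags (flat_counts user_tags)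

-- ===== LEMMAS AND PROOFS =====

-- A's inner step, de-conditionalised: the guard "if new: init 0" folded into getD's default
theorem stepA_eq (c : PySem.Dict String Int) (t : String) (v : Int) :
    (let c2 := if c.contains t then c else c.insert t 0
     c2.insert t (c2.getD t 0 + v)) = c.insert t (c.getD t 0 + v) := by
  by_cases h : c.contains t = true
  · simp [h]
  · have h' : c.contains t = false := by simpa using h
    simp only [h']
    have h0 : c.getD t 0 = 0 := by
      rw [PySem.Dict.getD_eq_get?_getD, (PySem.Dict.get?_eq_none_iff_contains c t).mpr h']
      rfl
    simp [PySem.Dict.insert_insert_self, PySem.Dict.getD_insert_self, h0]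

-- A's accumulation over the flattened pair list
def accA (F : List (String × Int)) : PySem.Dict String Int :=
  F.foldl (fun c p => c.insert p.1 (c.getD p.1 0 + p.2)) PySem.Dict.empty

theorem flat_counts_eq (user_tags : List (String × List (String × Int)))
    (hout : (user_tags.map (·.1)).Nodup)
    (hin : ∀ p ∈ user_tags, (p.2.map (·.1)).Nodup) :
    flat_counts user_tags = (accA (user_tags.flatMap (·.2))).items := by
  simp only [flat_counts]
  congr 1
  have hkeys : PySem.Dict.keys (PySem.Dict.mk user_tags) = user_tags.map (·.1) := rfl
  rw [hkeys, List.foldl_map]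
  have houter : ∀ (c : PySem.Dict String Int), ∀ p ∈ user_tags,
      (let tags := PySem.Dict.mk ((PySem.Dict.mk user_tags).getD p.1 [])
       (PySem.Dict.keys tags).foldl (fun counts tag =>
         let counts := if counts.contains tag then counts else counts.insert tag 0
         counts.insert tag (counts.getD tag 0 + tags.getD tag 0)) c)
      = p.2.foldl (fun c q => c.insert q.1 (c.getD q.1 0 + q.2)) c := by
    intro c p hp
    have hitems : (p.1, p.2) ∈ (PySem.Dict.mk user_tags).items := by
      simpa using hp
    have hndk : (PySem.Dict.mk user_tags).keys.Nodup := hout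
    have hget : (PySem.Dict.mk user_tags).getD p.1 [] = p.2 :=
      PySem.Dict.getD_of_mem_items _ hitems hndk []
    simp only [hget]
    have hkt : PySem.Dict.keys (PySem.Dict.mk p.2) = p.2.map (·.1) := rfl
    rw [hkt, List.foldl_map]
    apply PySem.List.foldl_congr_mem
    intro acc q hq
    have hq' : (q.1, q.2) ∈ (PySem.Dict.mk p.2).items := by simpa using hq
    have hgq : (PySem.Dict.mk p.2).getD q.1 0 = q.2 :=
      PySem.Dict.getD_of_mem_items _ hq' (hin p hp) 0
    rw [hgq]
    exact stepA_eq acc q.1 q.2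
  rw [PySem.List.foldl_congr_mem user_tags _ _ _ houter]
  rw [accA, List.flatMap_def, List.foldl_flatten, List.foldl_map]

-- value of A's accumulator at a tag: the sum over the matching pairs
theorem getD_accA_aux (l : List (String × Int)) (d : PySem.Dict String Int) (t : String) :
    (l.foldl (fun c p => c.insert p.1 (c.getD p.1 0 + p.2)) d).getD t 0
      = d.getD t 0 + ((l.filter (fun q => q.1 == t)).map (·.2)).sum := by
  induction l generalizing d with
  | nil => simp
  | cons p l ih =>
    simp only [List.foldl_cons, List.filter_cons, ih]
    by_cases h : p.1 = t
    · subst h; simp [PySem.Dict.getD_insert_self]; ring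
    · have hb : (p.1 == t) = false := by simpa using h
      have ht : t ≠ p.1 := Ne.symm h
      rw [PySem.Dict.getD_insert_of_ne d (d.getD p.1 0 + p.2) 0 ht]
      simp [hb]

-- A's items in canonical form: first-occurrence order of tags, each with its summed count
theorem items_accA (F : List (String × Int)) :
    (accA F).items
      = (PySem.Set.ofList (F.map (·.1))).map
          (fun t => (t, ((F.filter (fun q => q.1 == t)).map (·.2)).sum)) := by
  have hnd : (accA F).keys.Nodup := by
    have := PySem.Dict.nodup_keys_foldl_insert_key F (·.1)
      (fun d p => d.getD p.1 0 + p.2) PySem.Dict.empty (by simp)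
    simpa [accA] using this
  have hkeys : (accA F).keys = PySem.Set.ofList (F.map (·.1)) := by
    have := PySem.Dict.keys_foldl_insert_key F (·.1)
      (fun d p => d.getD p.1 0 + p.2) PySem.Dict.empty
    simpa [accA, PySem.Set.ofList_eq_foldl, PySem.Set.update] using this
  rw [PySem.Dict.items_eq_map_keys _ hnd 0, hkeys]
  apply List.map_congr_left
  intro t _
  congr 1
  simpa [accA] using getD_accA_aux F PySem.Dict.empty t

-- B's first pass: the pair (order, seen) stays equal componentwise and computes ordered dedup
theorem pass1_aux (l : List String) (s : PySem.Set String) :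
    l.foldl (fun (st : List String × PySem.Set String) tag =>
        if st.2.contains tag then st else (st.1 ++ [tag], st.2.add tag)) (s, s)
      = (PySem.Set.update s l, PySem.Set.update s l) := by
  induction l generalizing s with
  | nil => simp [PySem.Set.update]
  | cons t l ih =>
    simp only [List.foldl_cons]
    have hupd : PySem.Set.update s (t :: l) = PySem.Set.update (PySem.Set.add s t) l := rfl
    by_cases h : PySem.Set.contains s t = true
    · have ha : PySem.Set.add s t = s := by simp only [PySem.Set.add, h, if_true]
      simp only [h, if_true]
      rw [hupd, ha]
      exact ih s
    · have h' : PySem.Set.contains s t = false := by simpa using h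
      have ha : PySem.Set.add s t = s ++ [t] := by simp only [PySem.Set.add, h', Bool.false_eq_true, if_false]
      simp only [h', Bool.false_eq_true, if_false]
      rw [hupd, ha]
      exact ih (s ++ [t])

-- B's whole first pass, lists of key-lists at once
theorem pass1_outer (L : List (List (String × Int))) (s : PySem.Set String) :
    L.foldl (fun st tags => (tags.map (·.1)).foldl
        (fun (st : List String × PySem.Set String) tag =>
          if st.2.contains tag then st else (st.1 ++ [tag], st.2.add tag)) st) (s, s)
      = (PySem.Set.update s (L.flatten.map (·.1)), PySem.Set.update s (L.flatten.map (·.1))) := by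
  induction L generalizing s with
  | nil => simp [PySem.Set.update]
  | cons l L ih =>
    simp only [List.foldl_cons, List.flatten_cons, List.map_append]
    rw [pass1_aux (l.map (·.1)) s, ih (PySem.Set.update s (l.map (·.1)))]
    have : ∀ a b : List String, PySem.Set.update (PySem.Set.update s a) b
        = PySem.Set.update s (a ++ b) := by
      intro a b; simp [PySem.Set.update, List.foldl_append]
    rw [this]

-- a nodup-keyed literal dict looked up at t gives the sum of its (≤ 1) matching pairs
theorem getD_mk_nodup (l : List (String × Int)) (h : (l.map (·.1)).Nodup) (t : String) :
    (PySem.Dict.mk l).getD t 0 = ((l.filter (fun q => q.1 == t)).map (·.2)).sum := by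
  induction l with
  | nil => rfl
  | cons p l ih =>
    simp only [List.map_cons, List.nodup_cons] at h
    rw [PySem.Dict.getD_eq_get?_getD, PySem.Dict.get?_mk_cons]
    by_cases hb : p.1 = t
    · subst hb
      have hrest : l.filter (fun q => q.1 == p.1) = [] := by
        apply List.filter_eq_nil_iff.mpr
        intro q hq hqe
        exact h.1 (List.mem_map.mpr ⟨q, hq, (by simpa using hqe)⟩)
      simp [hrest]
    · have hb' : (p.1 == t) = false := by simpa using hb
      simp only [hb', if_false, List.filter_cons, Bool.false_eq_true]
      rw [← PySem.Dict.getD_eq_get?_getD]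
      exact ih h.2

-- B's second pass: the tag-major sum of lookups equals the sum over the flattened matching pairs
theorem sum_getD (uts : List (String × List (String × Int)))
    (hin : ∀ p ∈ uts, (p.2.map (·.1)).Nodup) (t : String) :
    ((uts.map (·.2)).map (fun tags => (PySem.Dict.mk tags).getD t 0)).sum
      = (((uts.flatMap (·.2)).filter (fun q => q.1 == t)).map (·.2)).sum := by
  induction uts with
  | nil => simp
  | cons p rest ih =>
    simp only [List.map_cons, List.sum_cons, List.flatMap_cons, List.filter_append,
      List.map_append, List.sum_append]
    rw [getD_mk_nodup p.2 (hin p (by simp)) t, ih (fun q hq => hin q (by simp [hq]))]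

-- B in the same canonical form
theorem flat_counts_alt_eq (user_tags : List (String × List (String × Int)))
    (hin : ∀ p ∈ user_tags, (p.2.map (·.1)).Nodup) :
    flat_counts_alt user_tags
      = (PySem.Set.ofList ((user_tags.flatMap (·.2)).map (·.1))).map
          (fun t => (t, (((user_tags.flatMap (·.2)).filter (fun q => q.1 == t)).map (·.2)).sum)) := by
  simp only [flat_counts_alt]
  have hvals : PySem.Dict.values (PySem.Dict.mk user_tags) = user_tags.map (·.2) := rfl
  have hkt : ∀ (tags : List (String × Int)),
      PySem.Dict.keys (PySem.Dict.mk tags) = tags.map (·.1) := fun _ => rfl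
  have hpass1 :
      (user_tags.map (·.2)).foldl (fun st tags =>
          (PySem.Dict.keys (PySem.Dict.mk tags)).foldl
            (fun (st : List String × PySem.Set String) tag =>
              if st.2.contains tag then st else (st.1 ++ [tag], st.2.add tag)) st)
        ([], PySem.Set.empty)
      = (PySem.Set.ofList ((user_tags.flatMap (·.2)).map (·.1)),
         PySem.Set.ofList ((user_tags.flatMap (·.2)).map (·.1))) := by
    simp only [hkt]
    have hse : (([], PySem.Set.empty) : List String × PySem.Set String)
        = ((PySem.Set.empty : PySem.Set String), (PySem.Set.empty : PySem.Set String)) := rfl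
    rw [hse, pass1_outer (user_tags.map (·.2)) PySem.Set.empty]
    have hfl : (user_tags.map (·.2)).flatten = user_tags.flatMap (·.2) :=
      List.flatMap_def.symm
    rw [hfl]
    simp [PySem.Set.ofList_eq_foldl, PySem.Set.update, PySem.Set.empty]
  rw [hvals, hpass1]
  apply List.map_congr_left
  intro t _
  congr 1
  exact sum_getD user_tags hin t

-- ===== VERDICT (by name: the statement is the Claim_ definition above) =====
theorem flat_counts_spec : Claim_equal_flat_counts := by
  intro ut _ hpre
  obtain ⟨hout, hin⟩ := hpre
  unfold Spec_flat_counts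
  rw [flat_counts_eq ut hout hin, flat_counts_alt_eq ut hin, items_accA]
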